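-- pv_equiv track=rewrite | github.com/Prod1gal/python_spring_work_2022 | unit_one/lesson__6__18.04.2022/hometask/task18.py | count_bones
-- ===== SOURCE A (Python) =====
-- def count_bones(combination):
--     s_list = []
--     summa = combination[0] + combination[1]
--     for a in range(1, 7):
--         for b in range(1, 7):
--             if (a + b == summa):
--                 s_list.append((a, b,))
--     tuple_list = sorted(tuple(s_list))
--     return tuple_list
-- ===== SOURCE B (Python) =====
-- def count_bones(combination):
--     s = combination[0] + combination[1]
--     lo = max(1, s - 6)
--     hi = min(6, s - 1)
--     return [(a, s - a) for a in range(lo, hi + 1)]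
-- ===== Notes on version B (the rewrite author's own statement) =====
-- stated objective: simpler
-- what changed: Replaces the 36-pair nested scan plus a final sort with a closed form: the valid first dice values form the contiguous range max(1,s-6)..min(6,s-1), so B emits [(a, s-a) for a in that range] with no search and no sort.
import Mathlib
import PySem

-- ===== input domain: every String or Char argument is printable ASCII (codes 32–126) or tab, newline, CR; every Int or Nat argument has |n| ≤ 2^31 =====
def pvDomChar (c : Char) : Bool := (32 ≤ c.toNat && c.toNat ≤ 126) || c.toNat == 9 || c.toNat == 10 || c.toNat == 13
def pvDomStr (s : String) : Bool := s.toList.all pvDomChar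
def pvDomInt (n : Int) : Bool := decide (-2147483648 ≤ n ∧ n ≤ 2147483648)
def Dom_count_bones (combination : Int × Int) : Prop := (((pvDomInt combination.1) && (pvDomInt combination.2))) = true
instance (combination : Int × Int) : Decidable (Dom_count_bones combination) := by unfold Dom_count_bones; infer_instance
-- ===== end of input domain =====

-- B: closed form — the valid first dice values are exactly the range max(1,s-6)..min(6,s-1), mapped to (a, s-a); no search, no sort. Objective: simpler.
-- ===== PORT A =====
def count_bones (combination : Int × Int) : List (Int × Int) :=
  let summa := combination.1 + combination.2
  let s_list := (PySem.List.pyRange 1 7 1).foldl (fun acc a =>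
    (PySem.List.pyRange 1 7 1).foldl (fun acc2 b =>
      if a + b = summa then acc2 ++ [(a, b)] else acc2) acc) ([] : List (Int × Int))
  PySem.List.sorted2 s_list (fun p => p.1) (fun p => p.2)

-- ===== PORT B =====
def count_bones_alt (combination : Int × Int) : List (Int × Int) :=
  let s := combination.1 + combination.2
  let lo := max 1 (s - 6)
  let hi := min 6 (s - 1)
  (PySem.List.pyRange lo (hi + 1) 1).map (fun a => (a, s - a))

-- ===== PRECONDITION & SPEC =====
def Spec_count_bones (combination : Int × Int) (out : List (Int × Int)) : Prop := out = count_bones_alt combination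
instance (combination : Int × Int) (out : List (Int × Int)) : Decidable (Spec_count_bones combination out) := by unfold Spec_count_bones; infer_instance

-- ===== CLAIM (what is proved, stated in full; the proofs are below) =====
def Claim_equal_count_bones : Prop := ∀ (combination : Int × Int), Dom_count_bones combination → Spec_count_bones combination (count_bones combination)

-- ===== LEMMAS AND PROOFS =====

lemma count_bones_eq_alt (c : Int × Int) : count_bones c = count_bones_alt c := by
  obtain ⟨x, y⟩ := c
  simp only [count_bones, count_bones_alt]
  generalize x + y = s
  by_cases h : 2 ≤ s ∧ s ≤ 12
  · obtain ⟨h1, h2⟩ := h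
    interval_cases s <;> decide
  · have hB : PySem.List.pyRange (max 1 (s - 6)) (min 6 (s - 1) + 1) 1 = [] := by
      rw [PySem.List.pyRange_one]
      have : (min 6 (s - 1) + 1 - max 1 (s - 6)).toNat = 0 := by omega
      rw [this]
      rfl
    rw [hB, (by decide : PySem.List.pyRange 1 7 1 = [1, 2, 3, 4, 5, 6])]
    simp only [PySem.List.foldl_append_ite, PySem.List.foldl_append_eq_flatMap,
      List.nil_append, List.map_nil]
    have hA : ([1, 2, 3, 4, 5, 6] : List Int).flatMap
        (fun a => ((([1, 2, 3, 4, 5, 6] : List Int).filter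
          (fun b => decide (a + b = s))).map (fun b => (a, b)))) = [] := by
      rw [List.flatMap_eq_nil_iff]
      intro a ha
      rw [List.map_eq_nil_iff, List.filter_eq_nil_iff]
      intro b hb
      simp only [List.mem_cons, List.not_mem_nil, or_false] at ha hb
      simp only [decide_eq_true_eq]
      omega
    rw [hA]
    rfl

-- ===== VERDICT (by name: the statement is the Claim_ definition above) =====
theorem count_bones_spec : Claim_equal_count_bones := by
  intro c _
  unfold Spec_count_bones
  exact count_bones_eq_alt c
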